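-- pv_equiv track=rewrite | github.com/JuanFerraro/Practice-Algorithms | uniformity_and_independence/pruebas_rachasMedia.py | calcularRachas
-- ===== SOURCE A (Python) =====
-- def calcularRachas(vectorAuxiliar, vectorRachas):
--     rachaMayor = 0
--     rachaActual = 1
--     for i in range(len(vectorAuxiliar)-1):
--         if(vectorAuxiliar[i] == vectorAuxiliar[i + 1]):
--             rachaActual = rachaActual + 1
--         else:
--             vectorRachas[rachaActual - 1] = vectorRachas[rachaActual - 1] + 1
--             if(rachaActual > rachaMayor):
--                 rachaMayor = rachaActual
--             rachaActual = 1
--     vectorRachas[rachaActual - 1] = vectorRachas[rachaActual - 1] + 1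
--     return vectorRachas
-- ===== SOURCE B (Python) =====
-- def calcularRachas(vectorAuxiliar, vectorRachas):
--     # Run-start positions: index 0, plus every index whose element differs
--     # from its predecessor.  Run lengths are differences of consecutive
--     # start positions (the last run ends at len(vectorAuxiliar)).
--     n = len(vectorAuxiliar)
--     starts = [i for i in range(n) if i == 0 or vectorAuxiliar[i] != vectorAuxiliar[i - 1]]
--     for s, e in zip(starts, starts[1:] + [n]):
--         vectorRachas[e - s - 1] += 1
--     return vectorRachas
-- ===== Notes on version B (the rewrite author's own statement) =====
-- stated objective: alternative
-- what changed: B computes the list of run-START positions with a comprehension and obtains each run length as the difference of consecutive start indices, instead of A's single pass carrying a running counter (and its unused rachaMayor); run lengths as index arithmetic, no counter state.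
-- intended difference: On empty vectorAuxiliar, A counts a phantom run of length 1 and returns vectorRachas with vectorRachas[0] incremented; B returns vectorRachas unchanged, which is intended since an empty sequence contains no runs. — e.g. on calcularRachas([], [0]): A returns [1], B returns [0]
import Mathlib
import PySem

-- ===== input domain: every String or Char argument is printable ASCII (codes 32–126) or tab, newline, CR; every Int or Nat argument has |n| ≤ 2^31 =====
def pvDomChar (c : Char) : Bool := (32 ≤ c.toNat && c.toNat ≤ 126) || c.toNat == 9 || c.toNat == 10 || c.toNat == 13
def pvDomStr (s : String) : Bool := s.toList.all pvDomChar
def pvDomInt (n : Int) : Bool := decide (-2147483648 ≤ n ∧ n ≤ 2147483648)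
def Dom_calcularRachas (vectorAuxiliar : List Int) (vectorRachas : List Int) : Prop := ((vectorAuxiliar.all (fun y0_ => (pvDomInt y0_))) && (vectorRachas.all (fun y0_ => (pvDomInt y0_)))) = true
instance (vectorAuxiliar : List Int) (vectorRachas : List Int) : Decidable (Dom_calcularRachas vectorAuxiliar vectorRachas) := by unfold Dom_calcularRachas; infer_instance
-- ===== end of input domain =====

-- B derives each run length as the difference of consecutive run-START positions
-- (computed by one comprehension) instead of A's running counter; on empty input B
-- counts no runs where A counts a phantom one (see D_ below).  Equivalence is about
-- the RETURN value only: both Pythons also mutate vectorRachas in place (with the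
-- same final contents).

-- `vectorRachas[r-1] += 1` (r ≥ 1 always); inside Pre_ the index is in range,
-- where List.set/getD behave exactly like the Python element assignment/read.
def pvBump (vr : List Int) (r : Int) : List Int :=
  vr.set (r - 1).toNat (vr.getD (r - 1).toNat 0 + 1)

-- ===== PORT A =====
-- the loop `for i in range(len(v)-1)` reading v[i], v[i+1] (always in range) is ported
-- as a fold over the list of adjacent pairs, same state (rachaMayor, rachaActual, vectorRachas)
def calcularRachas (vectorAuxiliar : List Int) (vectorRachas : List Int) : List Int :=
  let s := (vectorAuxiliar.zip vectorAuxiliar.tail).foldl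
    (fun (st : Int × Int × List Int) (p : Int × Int) =>
      if p.1 = p.2 then (st.1, st.2.1 + 1, st.2.2)
      else
        let rachas' := pvBump st.2.2 st.2.1
        let mayor' := if st.2.1 > st.1 then st.2.1 else st.1
        (mayor', 1, rachas'))
    (0, 1, vectorRachas)
  pvBump s.2.2 s.2.1

-- ===== PORT B =====
-- the comprehension over range(n) is the filter over List.range n; at i = 0 Python's
-- `or` short-circuits before reading v[i-1], and the Lean condition is likewise true
-- at i = 0 whatever getD returns there, so the Nat subtraction i-1 is harmless
def calcularRachas_alt (vectorAuxiliar : List Int) (vectorRachas : List Int) : List Int :=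
  let n := vectorAuxiliar.length
  let starts := (List.range n).filter
    (fun i => i == 0 || !(vectorAuxiliar.getD i 0 == vectorAuxiliar.getD (i - 1) 0))
  (starts.zip (starts.tail ++ [n])).foldl
    (fun acc p => pvBump acc ((p.2 : Int) - (p.1 : Int))) vectorRachas

-- ===== PRECONDITION & SPEC =====
-- run lengths of the consecutive-equal runs as A sees them (A treats the empty input
-- as one run of length 1); used only to state Pre_
def pvRuns : List (Int × Int) → Int → List Int
  | [], c => [c]
  | q :: ps, c => if q.1 = q.2 then pvRuns ps (c + 1) else c :: pvRuns ps 1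

-- Pre_ excludes exactly the inputs where some run A tallies is longer than
-- vectorRachas: there A raises IndexError on `vectorRachas[rachaActual-1] += 1`.
def Pre_calcularRachas (vectorAuxiliar : List Int) (vectorRachas : List Int) : Prop :=
  ∀ r ∈ pvRuns (vectorAuxiliar.zip vectorAuxiliar.tail) 1, r ≤ (vectorRachas.length : Int)
instance (vectorAuxiliar : List Int) (vectorRachas : List Int) : Decidable (Pre_calcularRachas vectorAuxiliar vectorRachas) := by unfold Pre_calcularRachas; infer_instance

def pvWitness_calcularRachas : List Int × List Int := ([1, 1, 2, 3], [0, 0, 0, 0])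

-- On empty vectorAuxiliar, A counts a phantom run of length 1 and returns vectorRachas
-- with vectorRachas[0] incremented; B returns vectorRachas unchanged, which is intended
-- since an empty sequence contains no runs.
def D_calcularRachas (vectorAuxiliar : List Int) (vectorRachas : List Int) : Prop :=
  vectorAuxiliar = []
instance (vectorAuxiliar : List Int) (vectorRachas : List Int) : Decidable (D_calcularRachas vectorAuxiliar vectorRachas) := by unfold D_calcularRachas; infer_instance

def Spec_calcularRachas (vectorAuxiliar : List Int) (vectorRachas : List Int) (out : List Int) : Prop := ¬ D_calcularRachas vectorAuxiliar vectorRachas → out = calcularRachas_alt vectorAuxiliar vectorRachas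
instance (vectorAuxiliar : List Int) (vectorRachas : List Int) (out : List Int) : Decidable (Spec_calcularRachas vectorAuxiliar vectorRachas out) := by unfold Spec_calcularRachas; infer_instance

def pvDiffWitness_calcularRachas : List Int × List Int := ([], [0])
def pvDiffWitnessOut_calcularRachas : (List Int) × (List Int) := ([1], [0])

-- ===== CLAIM (what is proved, stated in full; the proofs are below) =====
def Claim_unchanged_calcularRachas : Prop := ∀ (vectorAuxiliar : List Int) (vectorRachas : List Int), Dom_calcularRachas vectorAuxiliar vectorRachas → Pre_calcularRachas vectorAuxiliar vectorRachas → Spec_calcularRachas vectorAuxiliar vectorRachas (calcularRachas vectorAuxiliar vectorRachas)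
def Claim_changed_calcularRachas : Prop := Dom_calcularRachas (pvDiffWitness_calcularRachas.1) (pvDiffWitness_calcularRachas.2) ∧ Pre_calcularRachas (pvDiffWitness_calcularRachas.1) (pvDiffWitness_calcularRachas.2) ∧ D_calcularRachas (pvDiffWitness_calcularRachas.1) (pvDiffWitness_calcularRachas.2) ∧ calcularRachas (pvDiffWitness_calcularRachas.1) (pvDiffWitness_calcularRachas.2) = pvDiffWitnessOut_calcularRachas.1 ∧ calcularRachas_alt (pvDiffWitness_calcularRachas.1) (pvDiffWitness_calcularRachas.2) = pvDiffWitnessOut_calcularRachas.2 ∧ pvDiffWitnessOut_calcularRachas.1 ≠ pvDiffWitnessOut_calcularRachas.2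
def Claim_exact_calcularRachas : Prop := ∀ (vectorAuxiliar : List Int) (vectorRachas : List Int), Dom_calcularRachas vectorAuxiliar vectorRachas → Pre_calcularRachas vectorAuxiliar vectorRachas → D_calcularRachas vectorAuxiliar vectorRachas → calcularRachas vectorAuxiliar vectorRachas ≠ calcularRachas_alt vectorAuxiliar vectorRachas

-- ===== LEMMAS AND PROOFS =====

-- A's loop followed by its final bump, as a recursion on the pair list (rachaMayor dropped)
def pvA : List (Int × Int) → Int → List Int → List Int
  | [], c, vr => pvBump vr c
  | q :: ps, c, vr => if q.1 = q.2 then pvA ps (c + 1) vr else pvA ps 1 (pvBump vr c)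

theorem pvA_eq_foldA (ps : List (Int × Int)) : ∀ (m c : Int) (vr : List Int),
    (let s := ps.foldl
      (fun (st : Int × Int × List Int) (p : Int × Int) =>
        if p.1 = p.2 then (st.1, st.2.1 + 1, st.2.2)
        else
          let rachas' := pvBump st.2.2 st.2.1
          let mayor' := if st.2.1 > st.1 then st.2.1 else st.1
          (mayor', 1, rachas'))
      (m, c, vr)
     pvBump s.2.2 s.2.1) = pvA ps c vr := by
  induction ps with
  | nil => intro m c vr; simp [pvA]
  | cons q ps ih =>
    intro m c vr
    by_cases h : q.1 = q.2 <;> simp [pvA, h, ih]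

theorem pvA_eq_tally (ps : List (Int × Int)) : ∀ (c : Int) (vr : List Int),
    pvA ps c vr = (pvRuns ps c).foldl (fun acc r => pvBump acc r) vr := by
  induction ps with
  | nil => intro c vr; simp [pvA, pvRuns, List.foldl]
  | cons q ps ih =>
    intro c vr
    by_cases h : q.1 = q.2 <;> simp [pvA, pvRuns, h, ih]

-- run lengths of a :: t, recursively: first element either extends or closes the run
def pvIncHead : List Int → List Int
  | [] => []
  | h :: t => (h + 1) :: t

def pvRunsRec : Int → List Int → List Int
  | _, [] => [1]
  | a, b :: t => if a = b then pvIncHead (pvRunsRec b t) else 1 :: pvRunsRec b t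

def pvAddHead (k : Int) : List Int → List Int
  | [] => []
  | h :: t => (h + k) :: t

theorem pvAddHead_incHead (c : Int) (L : List Int) :
    pvAddHead (c - 1) (pvIncHead L) = pvAddHead c L := by
  cases L with
  | nil => simp [pvAddHead, pvIncHead]
  | cons h t => simp [pvAddHead, pvIncHead]

theorem pvAddHead_zero (L : List Int) : pvAddHead 0 L = L := by
  cases L <;> simp [pvAddHead]

theorem pvRuns_eq_runsRec (t : List Int) : ∀ (a : Int) (c : Int),
    pvRuns ((a :: t).zip t) c = pvAddHead (c - 1) (pvRunsRec a t) := by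
  induction t with
  | nil => intro a c; simp [pvRuns, pvRunsRec, pvAddHead]
  | cons b t' ih =>
    intro a c
    by_cases h : a = b
    · simp [pvRuns, pvRunsRec, h, ih, pvAddHead_incHead]
    · simp only [List.zip_cons_cons, pvRuns, h, ite_false, pvRunsRec, pvAddHead]
      rw [ih b 1]
      norm_num [pvAddHead_zero]

-- boundary positions (i in t with t[i] ≠ (a::t)[i]), recursively
def pvBnd : Int → List Int → List Nat
  | _, [] => []
  | a, b :: t => if a = b then (pvBnd b t).map (· + 1) else 0 :: (pvBnd b t).map (· + 1)

theorem pvFilter_range_eq_bnd (t : List Int) : ∀ (a : Int),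
    (List.range t.length).filter (fun i => !(t.getD i 0 == (a :: t).getD i 0)) = pvBnd a t := by
  induction t with
  | nil => intro a; simp [pvBnd]
  | cons b t' ih =>
    intro a
    rw [List.length_cons, List.range_succ_eq_map, List.filter_cons, List.filter_map]
    have hc : (fun i => !((b :: t').getD i 0 == (a :: b :: t').getD i 0)) ∘ Nat.succ
        = fun i => !(t'.getD i 0 == (b :: t').getD i 0) := by
      funext i; simp
    rw [hc, ih b]
    by_cases h : a = b
    · simp [pvBnd, h]
    · have hba : ¬ b = a := fun hh => h hh.symm
      simp [pvBnd, h, hba]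

-- the start positions of the runs of a :: t
theorem pvStarts_eq (t : List Int) (a : Int) :
    (List.range (a :: t).length).filter
      (fun i => i == 0 || !((a :: t).getD i 0 == (a :: t).getD (i - 1) 0))
    = 0 :: (pvBnd a t).map (· + 1) := by
  rw [List.length_cons, List.range_succ_eq_map, List.filter_cons]
  simp only [beq_self_eq_true, Bool.true_or, if_pos]
  rw [List.filter_map]
  have hc : (fun i => i == 0 || !((a :: t).getD i 0 == (a :: t).getD (i - 1) 0)) ∘ Nat.succ
      = fun i => !(t.getD i 0 == (a :: t).getD i 0) := by
    funext i; simp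
  rw [hc, pvFilter_range_eq_bnd t a]

-- difference list of consecutive start positions, terminated by N
def pvG (S : List Nat) (N : Nat) : List Int :=
  (S.zip (S.tail ++ [N])).map (fun p => (p.2 : Int) - (p.1 : Int))

theorem pvG_cons_cons (s0 s1 : Nat) (rest : List Nat) (N : Nat) :
    pvG (s0 :: s1 :: rest) N = ((s1 : Int) - (s0 : Int)) :: pvG (s1 :: rest) N := by
  simp [pvG]

theorem pvG_shift : ∀ (S : List Nat) (N : Nat), pvG (S.map (· + 1)) (N + 1) = pvG S N
  | [], N => by simp [pvG]
  | [s], N => by simp [pvG]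
  | s0 :: s1 :: rest, N => by
    simp only [List.map_cons]
    rw [pvG_cons_cons, pvG_cons_cons]
    rw [show ((s1 + 1) :: rest.map (· + 1)) = (s1 :: rest).map (· + 1) from by simp]
    rw [pvG_shift (s1 :: rest) N]
    congr 1
    push_cast
    ring

theorem pvG_eq_runsRec (t : List Int) : ∀ (a : Int),
    pvG (0 :: (pvBnd a t).map (· + 1)) (t.length + 1) = pvRunsRec a t := by
  induction t with
  | nil => intro a; simp [pvG, pvBnd, pvRunsRec]
  | cons b t' ih =>
    intro a
    rw [List.length_cons]
    by_cases h : a = b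
    · rw [show pvBnd a (b :: t') = (pvBnd b t').map (· + 1) from by simp [pvBnd, h]]
      rw [show pvRunsRec a (b :: t') = pvIncHead (pvRunsRec b t') from by simp [pvRunsRec, h]]
      cases hB : pvBnd b t' with
      | nil =>
        have hih := ih b
        rw [hB] at hih
        simp only [List.map_nil] at hih ⊢
        rw [← hih]
        simp [pvG, pvIncHead]
      | cons b0 B' =>
        have hih := ih b
        rw [hB] at hih
        simp only [List.map_cons] at hih ⊢
        rw [pvG_cons_cons] at hih ⊢
        rw [show ((b0 + 1 + 1 : Nat) :: (B'.map (· + 1)).map (· + 1))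
              = (((b0 + 1) :: B'.map (· + 1)).map (· + 1)) from by simp]
        rw [pvG_shift ((b0 + 1) :: B'.map (· + 1)) (t'.length + 1)]
        rw [← hih]
        simp only [pvIncHead]
        congr 1
    · rw [show pvBnd a (b :: t') = 0 :: (pvBnd b t').map (· + 1) from by simp [pvBnd, h]]
      rw [show pvRunsRec a (b :: t') = 1 :: pvRunsRec b t' from by simp [pvRunsRec, h]]
      simp only [List.map_cons]
      rw [pvG_cons_cons]
      rw [show ((0 + 1 : Nat) :: ((pvBnd b t').map (· + 1)).map (· + 1))
            = ((0 :: (pvBnd b t').map (· + 1)).map (· + 1)) from by simp]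
      rw [pvG_shift (0 :: (pvBnd b t').map (· + 1)) (t'.length + 1)]
      rw [ih b]
      norm_num

theorem altB_eq_tally (va vr : List Int) :
    calcularRachas_alt va vr
      = (pvG ((List.range va.length).filter
            (fun i => i == 0 || !(va.getD i 0 == va.getD (i - 1) 0)))
          va.length).foldl (fun acc r => pvBump acc r) vr := by
  unfold calcularRachas_alt pvG
  rw [List.foldl_map]

-- ===== VERDICT (by name: the statement is the Claim_ definition above) =====
theorem calcularRachas_spec : Claim_unchanged_calcularRachas := by
  intro va vr _ _ hD
  show calcularRachas va vr = calcularRachas_alt va vr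
  cases va with
  | nil => exact absurd rfl hD
  | cons a t =>
    unfold calcularRachas
    rw [pvA_eq_foldA ((a :: t).zip (a :: t).tail) 0 1 vr, pvA_eq_tally]
    rw [altB_eq_tally]
    have h1 : pvRuns ((a :: t).zip (a :: t).tail) 1 = pvRunsRec a t := by
      show pvRuns ((a :: t).zip t) 1 = _
      rw [pvRuns_eq_runsRec t a 1, show (1 : Int) - 1 = 0 from by norm_num, pvAddHead_zero]
    have h2 : pvG ((List.range (a :: t).length).filter
          (fun i => i == 0 || !((a :: t).getD i 0 == (a :: t).getD (i - 1) 0)))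
        (a :: t).length = pvRunsRec a t := by
      rw [pvStarts_eq t a, List.length_cons, pvG_eq_runsRec t a]
    rw [h1, h2]

theorem calcularRachas_changed : Claim_changed_calcularRachas := by
  unfold Claim_changed_calcularRachas; decide

theorem calcularRachas_tight : Claim_exact_calcularRachas := by
  intro va vr _ hPre hD heq
  subst hD
  cases vr with
  | nil =>
    have := hPre 1 (by simp [pvRuns])
    simp at this
  | cons h tl =>
    have : calcularRachas [] (h :: tl) = (h + 1) :: tl := by
      simp [calcularRachas, pvBump]
    rw [this] at heq
    have : calcularRachas_alt [] (h :: tl) = h :: tl := by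
      simp [calcularRachas_alt]
    rw [this] at heq
    have := List.head_eq_of_cons_eq heq
    omega
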